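-- pv_equiv track=rewrite | github.com/francescolampertico-us/ai-app-pa | app/pages/3_Disclosure_Tracker.py | _filter_csv_data
-- ===== SOURCE A (Python) =====
-- def _filter_csv_data(csv_data: dict, allowed_names: set) -> dict:
--     """Filter all CSV datasets to only include rows matching allowed names."""
--     filtered = {}
--     filtered["lda_filings"] = [
--         r for r in csv_data.get("lda_filings", [])
--         if r.get("registrant_name", "") in allowed_names
--         or r.get("client_name", "") in allowed_names
--     ]
--     filtered["lda_issues"] = [
--         r for r in csv_data.get("lda_issues", [])
--         if r.get("registrant", "") in allowed_names
--         or r.get("client", "") in allowed_names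
--     ]
--     filtered["lda_lobbyists"] = [
--         r for r in csv_data.get("lda_lobbyists", [])
--         if r.get("registrant", "") in allowed_names
--         or r.get("client", "") in allowed_names
--     ]
--     # FARA
--     filtered["fara_foreign_principals"] = [
--         r for r in csv_data.get("fara_foreign_principals", [])
--         if r.get("registrant_name", "") in allowed_names
--         or r.get("foreign_principal_name", "") in allowed_names
--     ]
--     filtered["fara_registrants"] = [
--         r for r in csv_data.get("fara_registrants", [])
--         if r.get("registrant_name", "") in allowed_names
--     ]
--     filtered["fara_documents"] = [
--         r for r in csv_data.get("fara_documents", [])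
--         if r.get("registrant_name", "") in allowed_names
--         or r.get("foreign_principal_name", "") in allowed_names
--     ]
--     filtered["fara_short_forms"] = csv_data.get("fara_short_forms", [])
--     return filtered
-- ===== SOURCE B (Python) =====
-- # Inverted-index re-implementation: per dataset, build a value->row-indices
-- # index, union the index buckets hit by allowed_names into a set of indices,
-- # and rebuild the dataset from the sorted indices (alternative algorithm).
-- _SPEC = [
--     ("lda_filings", ("registrant_name", "client_name")),
--     ("lda_issues", ("registrant", "client")),
--     ("lda_lobbyists", ("registrant", "client")),
--     ("fara_foreign_principals", ("registrant_name", "foreign_principal_name")),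
--     ("fara_registrants", ("registrant_name",)),
--     ("fara_documents", ("registrant_name", "foreign_principal_name")),
--     ("fara_short_forms", None),
-- ]
--
--
-- def _filter_csv_data(csv_data: dict, allowed_names: set) -> dict:
--     filtered = {}
--     for key, fields in _SPEC:
--         rows = csv_data.get(key, [])
--         if fields is None:
--             filtered[key] = rows
--             continue
--         pairs = [(r.get(f, ""), i) for i, r in enumerate(rows) for f in fields]
--         index = {}
--         for value, i in pairs:
--             index.setdefault(value, []).append(i)
--         hits = set()
--         for name in allowed_names:
--             hits.update(index.get(name, []))
--         filtered[key] = [rows[i] for i in sorted(hits)]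
--     return filtered
-- ===== Notes on version B (the rewrite author's own statement) =====
-- stated objective: alternative
-- what changed: Instead of filtering each dataset row-by-row with a membership test, B builds per dataset an inverted index from field value to row indices, unions the index buckets hit by allowed_names into a set of indices, and rebuilds the dataset from the sorted index set; the seven datasets are driven by one spec table.
import Mathlib
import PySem

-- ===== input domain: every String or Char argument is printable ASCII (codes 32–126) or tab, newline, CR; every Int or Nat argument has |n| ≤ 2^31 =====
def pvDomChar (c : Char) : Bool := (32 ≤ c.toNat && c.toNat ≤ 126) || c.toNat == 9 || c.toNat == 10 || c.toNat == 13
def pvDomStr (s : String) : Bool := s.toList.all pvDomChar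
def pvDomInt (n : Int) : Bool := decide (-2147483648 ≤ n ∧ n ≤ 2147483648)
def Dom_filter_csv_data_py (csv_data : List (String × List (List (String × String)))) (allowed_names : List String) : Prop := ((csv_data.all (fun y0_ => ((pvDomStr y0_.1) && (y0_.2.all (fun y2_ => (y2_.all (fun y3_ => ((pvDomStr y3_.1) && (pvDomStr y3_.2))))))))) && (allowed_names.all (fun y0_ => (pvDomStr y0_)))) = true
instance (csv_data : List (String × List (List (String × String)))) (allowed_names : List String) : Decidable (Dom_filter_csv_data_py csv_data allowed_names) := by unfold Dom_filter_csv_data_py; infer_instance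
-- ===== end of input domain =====

-- B re-implements the per-dataset filter with a different algorithm: an inverted value->row-indices index,
-- a union of the buckets hit by allowed_names, and reconstruction from the sorted index set (objective: alternative).


-- ===== PORT A =====
-- r.get(f, "") / csv_data.get(k, []) are PySem.Dict.getD on the association lists (exact);
-- filtered = {} then seven assignments is PySem.Dict.insert on Dict.empty, returned as its items list.
def pvRowGet (r : List (String × String)) (f : String) : String :=
  PySem.Dict.getD ⟨r⟩ f ""

def pvCsvGet (csv_data : List (String × List (List (String × String)))) (k : String) :
    List (List (String × String)) :=
  PySem.Dict.getD ⟨csv_data⟩ k []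

def filter_csv_data_py (csv_data : List (String × List (List (String × String)))) (allowed_names : List String) : List (String × List (List (String × String))) :=
  let filtered : PySem.Dict String (List (List (String × String))) := PySem.Dict.empty
  let filtered := filtered.insert "lda_filings"
    ((pvCsvGet csv_data "lda_filings").filter (fun r =>
      allowed_names.contains (pvRowGet r "registrant_name")
      || allowed_names.contains (pvRowGet r "client_name")))
  let filtered := filtered.insert "lda_issues"
    ((pvCsvGet csv_data "lda_issues").filter (fun r =>
      allowed_names.contains (pvRowGet r "registrant")
      || allowed_names.contains (pvRowGet r "client")))
  let filtered := filtered.insert "lda_lobbyists"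
    ((pvCsvGet csv_data "lda_lobbyists").filter (fun r =>
      allowed_names.contains (pvRowGet r "registrant")
      || allowed_names.contains (pvRowGet r "client")))
  let filtered := filtered.insert "fara_foreign_principals"
    ((pvCsvGet csv_data "fara_foreign_principals").filter (fun r =>
      allowed_names.contains (pvRowGet r "registrant_name")
      || allowed_names.contains (pvRowGet r "foreign_principal_name")))
  let filtered := filtered.insert "fara_registrants"
    ((pvCsvGet csv_data "fara_registrants").filter (fun r =>
      allowed_names.contains (pvRowGet r "registrant_name")))
  let filtered := filtered.insert "fara_documents"
    ((pvCsvGet csv_data "fara_documents").filter (fun r =>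
      allowed_names.contains (pvRowGet r "registrant_name")
      || allowed_names.contains (pvRowGet r "foreign_principal_name")))
  let filtered := filtered.insert "fara_short_forms" (pvCsvGet csv_data "fara_short_forms")
  filtered.items

-- ===== PORT B =====
-- B: per dataset, build (value, index) pairs, group them into an inverted index dict,
-- union the buckets of the allowed names into a set of row indices, rebuild from sorted(hits).
def pvSpecTable : List (String × Option (List String)) :=
  [("lda_filings", some ["registrant_name", "client_name"]),
   ("lda_issues", some ["registrant", "client"]),
   ("lda_lobbyists", some ["registrant", "client"]),
   ("fara_foreign_principals", some ["registrant_name", "foreign_principal_name"]),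
   ("fara_registrants", some ["registrant_name"]),
   ("fara_documents", some ["registrant_name", "foreign_principal_name"]),
   ("fara_short_forms", none)]

-- the body of B's loop for a filtered dataset (pairs / index / hits / sorted rebuild);
-- rows[i] is ported as pyGetD rows i []: every index in hits comes from enumerate(rows), so it is in range.
def pvProcess (rows : List (List (String × String))) (fields : List String)
    (allowed_names : List String) : List (List (String × String)) :=
  let pairs := (PySem.List.enumerate rows).flatMap
    (fun q => fields.map (fun f => (PySem.Dict.getD ⟨q.2⟩ f "", q.1)))
  let index := pairs.foldl
    (fun (d : PySem.Dict String (List Int)) p => d.modify p.1 [] (· ++ [p.2])) PySem.Dict.empty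
  let hits := allowed_names.foldl
    (fun (s : PySem.Set Int) name => PySem.Set.update s (index.getD name [])) PySem.Set.empty
  (PySem.List.sorted hits (fun i => i) false).map (fun i => PySem.List.pyGetD rows i [])

def filter_csv_data_py_alt (csv_data : List (String × List (List (String × String)))) (allowed_names : List String) : List (String × List (List (String × String))) :=
  (pvSpecTable.foldl
    (fun (filtered : PySem.Dict String (List (List (String × String)))) kf =>
      let rows := PySem.Dict.getD ⟨csv_data⟩ kf.1 []
      match kf.2 with
      | none => filtered.insert kf.1 rows
      | some fields => filtered.insert kf.1 (pvProcess rows fields allowed_names))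
    PySem.Dict.empty).items

-- ===== PRECONDITION & SPEC =====
def Spec_filter_csv_data_py (csv_data : List (String × List (List (String × String)))) (allowed_names : List String) (out : List (String × List (List (String × String)))) : Prop := out = filter_csv_data_py_alt csv_data allowed_names
instance (csv_data : List (String × List (List (String × String)))) (allowed_names : List String) (out : List (String × List (List (String × String)))) : Decidable (Spec_filter_csv_data_py csv_data allowed_names out) := by unfold Spec_filter_csv_data_py; infer_instance

-- ===== CLAIM (what is proved, stated in full; the proofs are below) =====
def Claim_equal_filter_csv_data_py : Prop := ∀ (csv_data : List (String × List (List (String × String)))) (allowed_names : List String), Dom_filter_csv_data_py csv_data allowed_names → Spec_filter_csv_data_py csv_data allowed_names (filter_csv_data_py csv_data allowed_names)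

-- ===== LEMMAS AND PROOFS =====

-- membership in B's hits-accumulating loop
lemma pv_mem_foldl_update {α β : Type} [BEq α] [LawfulBEq α] (l : List β) (g : β → List α)
    (s : PySem.Set α) (x : α) :
    x ∈ l.foldl (fun s b => PySem.Set.update s (g b)) s ↔ x ∈ s ∨ ∃ b ∈ l, x ∈ g b := by
  induction l generalizing s with
  | nil => simp
  | cons b t ih =>
    simp [ih, PySem.Set.mem_update]
    tauto

lemma pv_nodup_foldl_update {α β : Type} [BEq α] [LawfulBEq α] (l : List β) (g : β → List α)
    (s : PySem.Set α) (hs : s.Nodup) :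
    (l.foldl (fun s b => PySem.Set.update s (g b)) s).Nodup := by
  induction l generalizing s with
  | nil => exact hs
  | cons b t ih => exact ih _ (PySem.Set.nodup_update _ _ hs)

-- the kept rows, read off enumerate, are exactly the filter
lemma pv_enum_filter_snd {α : Type} (p : α → Bool) (xs : List α) :
    ∀ s : Int, ((PySem.List.enumerate xs s).filter (fun q => p q.2)).map (·.2) = xs.filter p := by
  induction xs with
  | nil => intro s; simp [PySem.List.enumerate_nil]
  | cons x t ih =>
    intro s
    rw [PySem.List.enumerate_cons]
    by_cases h : p x = true <;> simp [h, ih]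

-- main lemma: B's inverted-index pass computes A's filter
lemma pvProcess_eq (rows : List (List (String × String))) (fields : List String)
    (allowed_names : List String) :
    pvProcess rows fields allowed_names
      = rows.filter (fun r => fields.any (fun f =>
          allowed_names.contains (PySem.Dict.getD ⟨r⟩ f ""))) := by
  unfold pvProcess
  set p : List (String × String) → Bool :=
    fun r => fields.any (fun f => allowed_names.contains (PySem.Dict.getD ⟨r⟩ f "")) with hp
  set pairs := (PySem.List.enumerate rows).flatMap
    (fun q => fields.map (fun f => (PySem.Dict.getD ⟨q.2⟩ f "", q.1))) with hpairs
  set index := pairs.foldl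
    (fun (d : PySem.Dict String (List Int)) p => d.modify p.1 [] (· ++ [p.2])) PySem.Dict.empty
    with hindex
  set hits := allowed_names.foldl
    (fun (s : PySem.Set Int) name => PySem.Set.update s (index.getD name [])) PySem.Set.empty
    with hhits
  set target := ((PySem.List.enumerate rows).filter (fun q => p q.2)).map (·.1) with htarget
  -- characterise membership in hits
  have hbucket : ∀ n : String, index.getD n [] = (pairs.filter (fun q => q.1 == n)).map (·.2) := by
    intro n
    rw [hindex, PySem.Dict.getD_foldl_modify_append]
    simp
  have hmem : ∀ i : Int, i ∈ hits ↔
      ∃ (k : Nat) (_ : k < rows.length), i = (k : Int) ∧ p rows[k] = true := by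
    intro i
    rw [hhits, pv_mem_foldl_update]
    constructor
    · rintro (h | ⟨n, hn, hi⟩)
      · simp at h
      · rw [hbucket] at hi
        simp only [List.mem_map, List.mem_filter, beq_iff_eq] at hi
        obtain ⟨q, ⟨hq, hq1⟩, hq2⟩ := hi
        rw [hpairs] at hq
        simp only [List.mem_flatMap, List.mem_map] at hq
        obtain ⟨e, he, f, hf, hef⟩ := hq
        rw [PySem.List.mem_enumerate_iff] at he
        obtain ⟨k, hk, hek⟩ := he
        refine ⟨k, hk, ?_, ?_⟩
        · rw [← hq2, ← hef]; simp [hek]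
        · rw [hp]
          simp only [List.any_eq_true]
          refine ⟨f, hf, ?_⟩
          have : PySem.Dict.getD ⟨rows[k]⟩ f "" = n := by
            rw [← hq1, ← hef]; simp [hek]
          rw [this]
          simpa [List.contains_iff_mem] using hn
    · rintro ⟨k, hk, hik, hpk⟩
      rw [hp] at hpk
      simp only [List.any_eq_true] at hpk
      obtain ⟨f, hf, hcf⟩ := hpk
      refine Or.inr ⟨PySem.Dict.getD ⟨rows[k]⟩ f "", ?_, ?_⟩
      · simpa [List.contains_iff_mem] using hcf
      · rw [hbucket]
        simp only [List.mem_map, List.mem_filter, beq_iff_eq]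
        refine ⟨(PySem.Dict.getD ⟨rows[k]⟩ f "", (k : Int)), ⟨?_, rfl⟩, hik.symm⟩
        rw [hpairs]
        simp only [List.mem_flatMap, List.mem_map]
        refine ⟨((k : Int), rows[k]), ?_, f, hf, rfl⟩
        rw [PySem.List.mem_enumerate_iff]
        exact ⟨k, hk, by simp⟩
  -- membership in target
  have hmemT : ∀ i : Int, i ∈ target ↔
      ∃ (k : Nat) (_ : k < rows.length), i = (k : Int) ∧ p rows[k] = true := by
    intro i
    rw [htarget]
    simp only [List.mem_map, List.mem_filter]
    constructor
    · rintro ⟨q, ⟨hq, hpq⟩, hq1⟩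
      rw [PySem.List.mem_enumerate_iff] at hq
      obtain ⟨k, hk, hek⟩ := hq
      exact ⟨k, hk, by rw [← hq1, hek]; simp, by rw [hek] at hpq; exact hpq⟩
    · rintro ⟨k, hk, hik, hpk⟩
      refine ⟨((k : Int), rows[k]), ⟨?_, hpk⟩, hik.symm⟩
      rw [PySem.List.mem_enumerate_iff]
      exact ⟨k, hk, by simp⟩
  -- target is strictly increasing, hits is nodup, hence sorted(hits) = target
  have hTlt : target.Pairwise (fun a b : Int => a < b) := by
    rw [htarget]
    exact ((PySem.List.pairwise_lt_enumerate rows 0).filter _).map _ (fun _ _ h => h)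
  have hTnodup : target.Nodup := hTlt.imp (fun h => ne_of_lt h)
  have hHnodup : hits.Nodup := by
    rw [hhits]
    exact pv_nodup_foldl_update _ _ PySem.Set.empty (by simp [PySem.Set.empty])
  have hperm : target.Perm hits := by
    rw [List.perm_ext_iff_of_nodup hTnodup hHnodup]
    intro i
    rw [hmemT, hmem]
  have hsorted : PySem.List.sorted hits (fun i => i) false = target :=
    PySem.List.sorted_eq_of_perm_of_pairwise_lt _ _ _ hperm hTlt
  show (PySem.List.sorted hits (fun i => i) false).map (fun i => PySem.List.pyGetD rows i [])
      = List.filter p rows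
  rw [hsorted, htarget, List.map_map]
  have hcongr : ∀ q ∈ (PySem.List.enumerate rows).filter (fun q => p q.2),
      ((fun i => PySem.List.pyGetD rows i []) ∘ (·.1)) q = q.2 := by
    intro q hq
    have hq' := (List.mem_filter.mp hq).1
    rw [PySem.List.mem_enumerate_iff] at hq'
    obtain ⟨k, hk, hek⟩ := hq'
    simp [hek, List.getD_eq_getElem?_getD, hk]
  rw [List.map_congr_left hcongr, pv_enum_filter_snd]

-- ===== VERDICT (by name: the statement is the Claim_ definition above) =====
theorem filter_csv_data_py_spec : Claim_equal_filter_csv_data_py := by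
  intro csv_data allowed_names _
  unfold Spec_filter_csv_data_py filter_csv_data_py filter_csv_data_py_alt pvSpecTable
  simp only [List.foldl_cons, List.foldl_nil, pvProcess_eq, List.any_cons, List.any_nil,
    Bool.or_false, pvCsvGet, pvRowGet]
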